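-- pv_equiv track=rewrite | github.com/MMH5429/AETHER-CRYPTO | core/constants.py | _inverse_affine_transform
-- ===== SOURCE A (Python) =====
-- def _inverse_affine_transform(byte: int) -> int:
--     """Inverse of the AETHER affine transformation.
--
--     To invert b' = A*b + c:
--     1. Subtract the constant: b' ^ c
--     2. Multiply by A^(-1)
--
--     The inverse matrix for our circulant is defined by 0x4A (binary: 01001010).
--     We can verify: A * A^(-1) = I (identity).
--     """
--     # First XOR with the constant to undo the addition
--     byte ^= 0x03
--
--     # Apply the inverse circulant matrix
--     # The inverse matrix row is 0x4A = bits at positions 1, 3, 6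
--     result = 0
--     for i in range(8):
--         bit = 0
--         for j in [1, 3, 6]:  # Positions where the inverse matrix has 1s
--             bit ^= (byte >> ((i + j) % 8)) & 1
--         result |= bit << i
--     return result
-- ===== SOURCE B (Python) =====
-- def _ror8(x: int, j: int) -> int:
--     """Rotate an 8-bit value right by j (1 <= j <= 7)."""
--     return ((x >> j) | (x << (8 - j))) & 0xFF
--
--
-- def _inverse_affine_transform(byte: int) -> int:
--     # Undo the additive constant, keep only the low 8 bits.
--     b = (byte ^ 0x03) & 0xFF
--     # The inverse circulant 0x4A reads input bit (i+j) % 8 for j in {1, 3, 6}: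
--     # that is the XOR of three right-rotations of the whole byte.
--     return _ror8(b, 1) ^ _ror8(b, 3) ^ _ror8(b, 6)
-- ===== Notes on version B (the rewrite author's own statement) =====
-- stated objective: simpler
-- what changed: The nested per-output-bit loop (an outer pass over the output bit positions, an inner pass over the circulant's set bit offsets, accumulating single bits) is replaced by masking the byte to its low bits and XORing three whole-byte right-rotations, a closed-form expression with no loops.
import Mathlib
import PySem

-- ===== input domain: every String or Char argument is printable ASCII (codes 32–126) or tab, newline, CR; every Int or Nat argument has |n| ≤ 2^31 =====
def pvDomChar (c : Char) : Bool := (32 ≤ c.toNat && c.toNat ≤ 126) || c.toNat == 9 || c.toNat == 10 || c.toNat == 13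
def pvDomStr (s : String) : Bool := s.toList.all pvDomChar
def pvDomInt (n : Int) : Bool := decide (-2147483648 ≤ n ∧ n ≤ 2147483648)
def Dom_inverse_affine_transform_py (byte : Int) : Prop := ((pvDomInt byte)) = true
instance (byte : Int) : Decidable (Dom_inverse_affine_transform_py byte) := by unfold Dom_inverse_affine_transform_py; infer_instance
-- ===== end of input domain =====

-- B replaces A's nested per-output-bit loop by three whole-byte right-rotations of the
-- masked byte XORed together — a closed-form bit-manipulation, same return value (simpler).


-- ===== PORT A =====
-- Helper: the inverse-circulant loop of A ('for i in range(8): … for j in [1,3,6]: …'),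
-- applied to the byte after the constant has been XORed off.
def pvAcirc (b : Int) : Int :=
  (PySem.List.pyRange 0 8 1).foldl (fun result i =>
    let bit := ([1, 3, 6] : List Int).foldl
      (fun bit j => PySem.Int.bxor bit (PySem.Int.band (b >>> (PySem.Int.mod (i + j) 8).toNat) 1)) 0
    -- i ranges over 0..7, so 'i.toNat' is exactly Python's shift amount
    PySem.Int.bor result (bit <<< i.toNat)) 0

def inverse_affine_transform_py (byte : Int) : Int :=
  pvAcirc (PySem.Int.bxor byte 3)

-- ===== PORT B =====
-- B changes the bit-by-bit double loop into three whole-byte right-rotations XORed together.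
-- Helper: _ror8 of Source B (j is 1, 3 or 6 at every call site, so the .toNat shifts are exact).
def pvRor8 (x j : Int) : Int :=
  PySem.Int.band (PySem.Int.bor (x >>> j.toNat) (x <<< (8 - j).toNat)) 255

def inverse_affine_transform_py_alt (byte : Int) : Int :=
  let b := PySem.Int.band (PySem.Int.bxor byte 3) 255
  PySem.Int.bxor (PySem.Int.bxor (pvRor8 b 1) (pvRor8 b 3)) (pvRor8 b 6)

-- ===== PRECONDITION & SPEC =====
def Spec_inverse_affine_transform_py (byte : Int) (out : Int) : Prop := out = inverse_affine_transform_py_alt byte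
instance (byte : Int) (out : Int) : Decidable (Spec_inverse_affine_transform_py byte out) := by unfold Spec_inverse_affine_transform_py; infer_instance

-- ===== CLAIM (what is proved, stated in full; the proofs are below) =====
def Claim_equal_inverse_affine_transform_py : Prop := ∀ (byte : Int), Dom_inverse_affine_transform_py byte → Spec_inverse_affine_transform_py byte (inverse_affine_transform_py byte)

-- ===== LEMMAS AND PROOFS =====

-- Python's 'x & 255' is 'x mod 256' (also for negative x).
theorem pv_band255 (y : Int) : PySem.Int.band y 255 = y % 256 := by
  unfold PySem.Int.band
  have e : ∀ n : Nat, n &&& 255 = n % 256 := fun n => Nat.and_two_pow_sub_one_eq_mod n 8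
  split_ifs with h1 h2 h2
  · rw [show Int.toNat 255 = 255 from rfl, e]; omega
  · norm_num at h2
  · rw [show Int.toNat 255 = 255 from rfl, Nat.and_comm, e]; omega
  · norm_num at h2

-- Bit k < 8 of y only depends on y mod 256.
theorem pv_bit_low (y : Int) (k : Nat) (hk : k < 8) :
    PySem.Int.band (y >>> k) 1 = PySem.Int.band ((y % 256) >>> k) 1 := by
  rw [PySem.Int.band_one, PySem.Int.band_one,
      PySem.Int.mod_eq_emod_of_pos (by norm_num), PySem.Int.mod_eq_emod_of_pos (by norm_num),
      Int.shiftRight_eq_div_pow, Int.shiftRight_eq_div_pow]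
  interval_cases k <;> norm_num <;> omega

-- A's loop reads its argument only through bits 0..7.
theorem pvAcirc_congr (y r : Int)
    (h : ∀ k : Nat, k < 8 → PySem.Int.band (y >>> k) 1 = PySem.Int.band (r >>> k) 1) :
    pvAcirc y = pvAcirc r := by
  have hr : PySem.List.pyRange 0 8 1 = [0, 1, 2, 3, 4, 5, 6, 7] := by decide
  simp only [pvAcirc, hr, List.foldl,
      show (PySem.Int.mod (0 + 1) 8).toNat = 1 from by decide,
      show (PySem.Int.mod (0 + 3) 8).toNat = 3 from by decide,
      show (PySem.Int.mod (0 + 6) 8).toNat = 6 from by decide,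
      show (PySem.Int.mod (1 + 1) 8).toNat = 2 from by decide,
      show (PySem.Int.mod (1 + 3) 8).toNat = 4 from by decide,
      show (PySem.Int.mod (1 + 6) 8).toNat = 7 from by decide,
      show (PySem.Int.mod (2 + 1) 8).toNat = 3 from by decide,
      show (PySem.Int.mod (2 + 3) 8).toNat = 5 from by decide,
      show (PySem.Int.mod (2 + 6) 8).toNat = 0 from by decide,
      show (PySem.Int.mod (3 + 1) 8).toNat = 4 from by decide,
      show (PySem.Int.mod (3 + 3) 8).toNat = 6 from by decide,
      show (PySem.Int.mod (3 + 6) 8).toNat = 1 from by decide,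
      show (PySem.Int.mod (4 + 1) 8).toNat = 5 from by decide,
      show (PySem.Int.mod (4 + 3) 8).toNat = 7 from by decide,
      show (PySem.Int.mod (4 + 6) 8).toNat = 2 from by decide,
      show (PySem.Int.mod (5 + 1) 8).toNat = 6 from by decide,
      show (PySem.Int.mod (5 + 3) 8).toNat = 0 from by decide,
      show (PySem.Int.mod (5 + 6) 8).toNat = 3 from by decide,
      show (PySem.Int.mod (6 + 1) 8).toNat = 7 from by decide,
      show (PySem.Int.mod (6 + 3) 8).toNat = 1 from by decide,
      show (PySem.Int.mod (6 + 6) 8).toNat = 4 from by decide,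
      show (PySem.Int.mod (7 + 1) 8).toNat = 0 from by decide,
      show (PySem.Int.mod (7 + 3) 8).toNat = 2 from by decide,
      show (PySem.Int.mod (7 + 6) 8).toNat = 5 from by decide,
      ]
  rw [h 0 (by norm_num), h 1 (by norm_num), h 2 (by norm_num), h 3 (by norm_num),
      h 4 (by norm_num), h 5 (by norm_num), h 6 (by norm_num), h 7 (by norm_num)]

-- On each of the 256 byte values the two computations agree (kernel evaluation).
set_option maxRecDepth 100000 in
theorem pv_agree : ∀ m : Fin 256, pvAcirc ((m : Nat) : Int) =
    PySem.Int.bxor (PySem.Int.bxor (pvRor8 ((m : Nat) : Int) 1) (pvRor8 ((m : Nat) : Int) 3))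
      (pvRor8 ((m : Nat) : Int) 6) := by decide

-- ===== VERDICT (by name: the statement is the Claim_ definition above) =====
theorem inverse_affine_transform_py_spec : Claim_equal_inverse_affine_transform_py := by
  intro byte _
  unfold Spec_inverse_affine_transform_py inverse_affine_transform_py inverse_affine_transform_py_alt
  set y := PySem.Int.bxor byte 3 with hy
  have h0 : 0 ≤ y % 256 := Int.emod_nonneg y (by norm_num)
  have h1 : y % 256 < 256 := Int.emod_lt_of_pos y (by norm_num)
  have hc : (((y % 256).toNat : Nat) : Int) = y % 256 := Int.toNat_of_nonneg h0
  have ha := pv_agree ⟨(y % 256).toNat, by omega⟩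
  simp only [hc] at ha
  rw [pvAcirc_congr y (y % 256) (pv_bit_low y), ha, pv_band255]
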